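-- pv_equiv track=rewrite | github.com/gaia-platform/GaiaPlatform | dev_tools/github-actions/build_job_section.py | __create_build_map_and_ordered_list
-- ===== SOURCE A (Python) =====
-- def __create_build_map_and_ordered_list(prerun_outp):
--     current_section = None
--     build_map = {}
--     ordered_build_list = []
--     for i in prerun_outp:
--         if i.startswith("cd $GAIA_REPO/"):
--             current_section = i
--             ordered_build_list.append(i)
--             build_map[current_section] = []
--         if current_section and i.strip():
--             build_map[current_section].append(i)
--     return build_map, ordered_build_list
-- ===== SOURCE B (Python) =====
-- def __create_build_map_and_ordered_list(prerun_outp):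
--     def is_header(line):
--         return line.startswith("cd $GAIA_REPO/")
--     k = 0
--     while k < len(prerun_outp) and not is_header(prerun_outp[k]):
--         k += 1
--     rest = prerun_outp[k:]
--     build_map = {}
--     ordered_build_list = []
--     while rest:
--         header = rest[0]
--         j = 1
--         while j < len(rest) and not is_header(rest[j]):
--             j += 1
--         build_map[header] = [header] + [line for line in rest[1:j] if line.strip()]
--         ordered_build_list.append(header)
--         rest = rest[j:]
--     return build_map, ordered_build_list
-- ===== Notes on version B (the rewrite author's own statement) =====
-- stated objective: alternative
-- what changed: A is a single per-line state machine carrying a current-section register and mutating the dict entry line by line; B is a two-phase segment grouper: it drops the prefix before the first header, then repeatedly spans to the next header and assigns each whole blank-filtered segment (header included) at once.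
import Mathlib
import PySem

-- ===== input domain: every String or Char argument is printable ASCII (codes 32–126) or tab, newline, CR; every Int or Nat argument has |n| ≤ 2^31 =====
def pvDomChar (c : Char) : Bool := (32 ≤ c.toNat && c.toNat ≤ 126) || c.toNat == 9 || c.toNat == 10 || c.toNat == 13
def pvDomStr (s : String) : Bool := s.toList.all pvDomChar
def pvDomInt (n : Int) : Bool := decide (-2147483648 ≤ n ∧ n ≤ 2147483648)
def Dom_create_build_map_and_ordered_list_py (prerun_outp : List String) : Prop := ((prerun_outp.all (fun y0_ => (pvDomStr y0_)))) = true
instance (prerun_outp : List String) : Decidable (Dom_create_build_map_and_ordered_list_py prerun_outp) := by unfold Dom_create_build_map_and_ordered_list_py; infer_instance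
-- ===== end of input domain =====

-- B replaces A's per-line state machine by a two-phase segment grouper (find the first
-- header, then repeatedly span to the next header and assign the filtered segment);
-- objective: alternative decomposition, same cost.

-- ===== PORT A =====
def pvIsHeader (s : String) : Bool := PySem.Str.startswith s "cd $GAIA_REPO/"

-- one iteration of A's for-loop over state (current_section, build_map, ordered_build_list)
def pvStepA (st : Option String × PySem.Dict String (List String) × List String) (i : String) :
    Option String × PySem.Dict String (List String) × List String :=
  let st1 := if pvIsHeader i then (some i, st.2.1.insert i ([] : List String), st.2.2 ++ [i]) else st
  match st1 with
  | (some c, m, o) =>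
      -- 'if current_section and i.strip():' — truthiness of both strings; the key c is
      -- always present in m here, so build_map[current_section].append(i) is m.modify c [] (· ++ [i])
      if c ≠ "" ∧ PySem.Str.strip i ≠ "" then (some c, m.modify c [] (· ++ [i]), o) else (some c, m, o)
  | (none, m, o) => (none, m, o)

def create_build_map_and_ordered_list_py (prerun_outp : List String) :
    (List (String × List String)) × List String :=
  let st := prerun_outp.foldl pvStepA (none, PySem.Dict.empty, [])
  (st.2.1.items, st.2.2)

-- ===== PORT B =====
def pvNotHeader (s : String) : Bool := !pvIsHeader s

-- B's outer while-loop: rest always starts with a header; span to the next header,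
-- assign the blank-filtered segment (header included), recurse on the remainder.
def pvAltLoop : List String → PySem.Dict String (List String) → List String →
    PySem.Dict String (List String) × List String
  | [], m, o => (m, o)
  | h :: t, m, o =>
      pvAltLoop (t.dropWhile pvNotHeader)
        (m.insert h (h :: (t.takeWhile pvNotHeader).filter (fun l => PySem.Str.strip l != "")))
        (o ++ [h])
  termination_by l _ _ => l.length
  decreasing_by
    simp only [List.length_cons]
    exact Nat.lt_succ_of_le (List.length_dropWhile_le _ _)

def create_build_map_and_ordered_list_py_alt (prerun_outp : List String) :
    (List (String × List String)) × List String :=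
  -- B's first while-loop advances an index past the non-header prefix: rest = prerun_outp[k:]
  let st := pvAltLoop (prerun_outp.dropWhile pvNotHeader) PySem.Dict.empty []
  (st.1.items, st.2)

-- ===== PRECONDITION & SPEC =====
def Spec_create_build_map_and_ordered_list_py (prerun_outp : List String) (out : (List (String × List String)) × List String) : Prop := out = create_build_map_and_ordered_list_py_alt prerun_outp
instance (prerun_outp : List String) (out : (List (String × List String)) × List String) : Decidable (Spec_create_build_map_and_ordered_list_py prerun_outp out) := by unfold Spec_create_build_map_and_ordered_list_py; infer_instance

-- ===== CLAIM (what is proved, stated in full; the proofs are below) =====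
def Claim_equal_create_build_map_and_ordered_list_py : Prop := ∀ (prerun_outp : List String), Dom_create_build_map_and_ordered_list_py prerun_outp → Spec_create_build_map_and_ordered_list_py prerun_outp (create_build_map_and_ordered_list_py prerun_outp)

-- ===== LEMMAS AND PROOFS =====

def pvProj (st : Option String × PySem.Dict String (List String) × List String) :
    PySem.Dict String (List String) × List String := (st.2.1, st.2.2)

theorem pv_modify_insert_self (d : PySem.Dict String (List String)) (k : String)
    (v d0 : List String) (f : List String → List String) :
    (d.insert k v).modify k d0 f = d.insert k (f v) := by
  simp [PySem.Dict.modify, PySem.Dict.getD_insert_self, PySem.Dict.insert_insert_self]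

theorem pv_mem_dropWhile_of_not {α : Type} (p : α → Bool) (l : List α) (c : α)
    (hc : c ∈ l) (hpc : p c = false) : c ∈ l.dropWhile p := by
  induction l with
  | nil => cases hc
  | cons a t ih =>
    rw [List.dropWhile_cons]
    by_cases hpa : p a = true
    · simp only [hpa]
      rcases List.mem_cons.mp hc with h | h
      · exact absurd (h ▸ hpa) (by simp [hpc])
      · exact ih h
    · simp [hpa, hc]

theorem pv_header_ne (s : String) (hs : pvIsHeader s = true) : s ≠ "" := by
  unfold pvIsHeader PySem.Str.startswith at hs
  rw [PySem.Chars.startswith_iff] at hs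
  obtain ⟨t, ht⟩ := hs
  intro h
  rw [h] at ht
  simp at ht

theorem pv_header_strip_ne (s : String) (hs : pvIsHeader s = true) :
    PySem.Str.strip s ≠ "" := by
  unfold pvIsHeader PySem.Str.startswith at hs
  rw [PySem.Chars.startswith_iff] at hs
  obtain ⟨t, ht⟩ := hs
  have hmem : 'c' ∈ s.toList := by rw [← ht]; simp
  have hsp : PySem.Chars.isspace 'c' = false := by decide
  have h1 : 'c' ∈ PySem.Chars.lstrip s.toList :=
    pv_mem_dropWhile_of_not _ _ _ hmem hsp
  have h2 : 'c' ∈ PySem.Chars.strip s.toList := by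
    unfold PySem.Chars.strip PySem.Chars.rstrip
    rw [List.mem_reverse]
    exact pv_mem_dropWhile_of_not _ _ _ (List.mem_reverse.mpr h1) hsp
  intro h
  have := congrArg String.toList h
  rw [PySem.Str.toList_strip] at this
  rw [this] at h2
  simp at h2

-- folding A's loop from a header state over t equals B's grouper, with v the part of the
-- current section already collected
theorem pvL2 (t : List String) : ∀ (h : String) (v : List String)
    (m : PySem.Dict String (List String)) (o : List String), pvIsHeader h = true →
    pvProj (t.foldl pvStepA (some h, m.insert h v, o)) =
      pvAltLoop (t.dropWhile pvNotHeader)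
        (m.insert h (v ++ (t.takeWhile pvNotHeader).filter (fun l => PySem.Str.strip l != ""))) o := by
  induction t with
  | nil => intro h v m o hh; simp [pvProj, pvAltLoop.eq_def]
  | cons x t ih =>
    intro h v m o hh
    by_cases hx : pvIsHeader x = true
    · have hstep : pvStepA (some h, m.insert h v, o) x =
          (some x, (m.insert h v).insert x [x], o ++ [x]) := by
        simp [pvStepA, hx, pv_header_ne x hx, pv_header_strip_ne x hx, pv_modify_insert_self]
      rw [List.foldl_cons, hstep, ih x [x] (m.insert h v) (o ++ [x]) hx]
      have hnx : pvNotHeader x = false := by simp [pvNotHeader, hx]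
      rw [List.dropWhile_cons, List.takeWhile_cons]
      simp only [hnx, Bool.false_eq_true, ite_false]
      rw [pvAltLoop]
      simp
    · have hnx : pvNotHeader x = true := by simp [pvNotHeader, hx]
      by_cases hsx : PySem.Str.strip x = ""
      · have hstep : pvStepA (some h, m.insert h v, o) x = (some h, m.insert h v, o) := by
          simp [pvStepA, hx, hsx]
        rw [List.foldl_cons, hstep, ih h v m o hh]
        rw [List.dropWhile_cons, List.takeWhile_cons]
        simp [hnx, hsx]
      · have hstep : pvStepA (some h, m.insert h v, o) x =
            (some h, m.insert h (v ++ [x]), o) := by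
          simp [pvStepA, hx, pv_header_ne h hh, hsx, pv_modify_insert_self]
        rw [List.foldl_cons, hstep, ih h (v ++ [x]) m o hh]
        rw [List.dropWhile_cons, List.takeWhile_cons]
        simp [hnx, hsx, List.append_assoc]

-- folding A's loop from the initial (None) state equals B's grouper after the prefix drop
theorem pvL1 (l : List String) : ∀ (m : PySem.Dict String (List String)) (o : List String),
    pvProj (l.foldl pvStepA (none, m, o)) = pvAltLoop (l.dropWhile pvNotHeader) m o := by
  induction l with
  | nil => intro m o; rw [List.dropWhile_nil, pvAltLoop]; simp [pvProj]
  | cons x t ih =>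
    intro m o
    by_cases hx : pvIsHeader x = true
    · have hstep : pvStepA (none, m, o) x = (some x, m.insert x [x], o ++ [x]) := by
        simp [pvStepA, hx, pv_header_ne x hx, pv_header_strip_ne x hx, pv_modify_insert_self]
      rw [List.foldl_cons, hstep, pvL2 t x [x] m (o ++ [x]) hx]
      have hnx : pvNotHeader x = false := by simp [pvNotHeader, hx]
      rw [List.dropWhile_cons]
      simp only [hnx, Bool.false_eq_true, ite_false]
      rw [pvAltLoop]
      simp
    · have hstep : pvStepA (none, m, o) x = (none, m, o) := by
        simp [pvStepA, hx]
      rw [List.foldl_cons, hstep, ih m o, List.dropWhile_cons]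
      simp [pvNotHeader, hx]

-- ===== VERDICT (by name: the statement is the Claim_ definition above) =====
theorem create_build_map_and_ordered_list_py_spec : Claim_equal_create_build_map_and_ordered_list_py := by
  intro prerun_outp _
  unfold Spec_create_build_map_and_ordered_list_py
  unfold create_build_map_and_ordered_list_py create_build_map_and_ordered_list_py_alt
  have := pvL1 prerun_outp PySem.Dict.empty []
  simp only [pvProj] at this
  simp only [Prod.ext_iff] at this ⊢
  exact ⟨congrArg PySem.Dict.items this.1, this.2⟩
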